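-- pv_equiv track=rewrite | github.com/pbeuar/advent2024 | 11/quiz11.py | iter_stone
-- ===== SOURCE A (Python) =====
-- def apply_rules(num):
--     if num == 0:
--         return [1]
--     strnum = str(num)
--     if len(strnum)%2 == 0:
--         half = int(len(strnum)/2)
--         return [int(strnum[:half]), int(strnum[half:])]
--     return [num*2024]
--
-- def iter_stone(stone, times):
--     start = [stone]
--     for _ in range(times):
--         new = []
--         for s in start:
--             ns = apply_rules(s)
--             new += ns
--
--         start = new
--
--     return len(start)
-- ===== SOURCE B (Python) =====
-- def iter_stone(stone, times):
--     memo = {}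
--
--     def count(s, n):
--         if n <= 0:
--             return 1
--         key = (s, n)
--         if key in memo:
--             return memo[key]
--         if s == 0:
--             children = [1]
--         else:
--             d = str(s)
--             if len(d) % 2 == 0:
--                 h = len(d) // 2
--                 children = [int(d[:h]), int(d[h:])]
--             else:
--                 children = [s * 2024]
--         total = 0
--         for c in children:
--             total += count(c, n - 1)
--         memo[key] = total
--         return total
--
--     return count(stone, times)
-- ===== Notes on version B (the rewrite author's own statement) =====
-- stated objective: faster
-- what changed: B replaces A's breadth-first explicit stone list by a top-down memoized recursion counting the descendants of each (stone value, remaining steps) pair, never materializing the stone population.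
-- outside the precondition, e.g. on iter_stone(-34, 1): A returns 1, B returns 1; on iter_stone(-1, 1): A raises ValueError, B raises ValueError
import Mathlib
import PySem

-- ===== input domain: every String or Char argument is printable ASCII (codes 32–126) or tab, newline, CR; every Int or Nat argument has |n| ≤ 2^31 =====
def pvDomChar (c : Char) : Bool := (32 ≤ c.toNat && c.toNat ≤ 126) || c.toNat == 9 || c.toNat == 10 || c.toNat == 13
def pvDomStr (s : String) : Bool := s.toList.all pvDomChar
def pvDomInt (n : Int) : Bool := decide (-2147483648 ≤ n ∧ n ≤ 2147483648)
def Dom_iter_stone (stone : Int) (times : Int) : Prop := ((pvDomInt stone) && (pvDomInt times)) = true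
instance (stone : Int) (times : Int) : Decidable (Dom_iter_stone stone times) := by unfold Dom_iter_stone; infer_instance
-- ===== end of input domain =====

-- B replaces A's exponentially growing explicit stone list by a top-down memoized
-- recursion on (stone value, remaining steps) (objective: faster; measured so in a timing run).


-- ===== PORT A =====
-- apply_rules(num); int(len(strnum)/2) equals floor division since len ≥ 0.
-- int(...) on the two halves raises ValueError only on a '-'-prefixed half, which is unreachable
-- under Pre_iter_stone; '.getD 0' marks exactly that unreachable raise.
def apply_rules (num : Int) : List Int :=
  if num = 0 then [1]
  else
    let strnum := PySem.Int.toStr num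
    if PySem.Int.mod (PySem.Str.len strnum) 2 = 0 then
      let half := PySem.Int.floordiv (PySem.Str.len strnum) 2
      [(PySem.Int.ofStr? (PySem.Str.slice strnum none (some half))).getD 0,
       (PySem.Int.ofStr? (PySem.Str.slice strnum (some half) none)).getD 0]
    else [num * 2024]

def iter_stone (stone : Int) (times : Int) : Int :=
  let start :=
    (PySem.List.pyRange 0 times 1).foldl
      (fun start _ => start.foldl (fun new s => new ++ apply_rules s) []) [stone]
  PySem.List.len start

-- ===== PORT B =====
-- the same one-stone rule computed inline by Source B's count (the '.getD 0' again marks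
-- the '-'-prefixed-half raise, unreachable under Pre_)
def stone_children (s : Int) : List Int :=
  if s = 0 then [1]
  else
    let d := PySem.Int.toStr s
    if PySem.Int.mod (PySem.Str.len d) 2 = 0 then
      let h := PySem.Int.floordiv (PySem.Str.len d) 2
      [(PySem.Int.ofStr? (PySem.Str.slice d none (some h))).getD 0,
       (PySem.Int.ofStr? (PySem.Str.slice d (some h) none)).getD 0]
    else [s * 2024]

-- Source B's count(s, n) with the memo dict threaded through; n : Nat mirrors the
-- 'n <= 0: return 1' base case (times.toNat at the call site maps n ≤ 0 to 0).
def countMemo (s : Int) : Nat → PySem.Dict (Int × Nat) Int → Int × PySem.Dict (Int × Nat) Int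
  | 0, memo => (1, memo)
  | n + 1, memo =>
    match memo.get? (s, n + 1) with
    | some v => (v, memo)
    | none =>
      let r := (stone_children s).foldl
        (fun (p : Int × PySem.Dict (Int × Nat) Int) c =>
          let q := countMemo c n p.2
          (p.1 + q.1, q.2)) (0, memo)
      (r.1, r.2.insert (s, n + 1) r.1)

def iter_stone_alt (stone : Int) (times : Int) : Int :=
  (countMemo stone times.toNat PySem.Dict.empty).1

-- ===== PRECONDITION & SPEC =====
-- Pre_ excludes negative starting stones (unless times ≤ 0, where no rule is applied): A's digit
-- splitting treats the '-' sign as a digit, so whenever the iteration reaches an even-length negative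
-- stone (e.g. -1 directly, since str(-1) = '-1') int('-') raises ValueError; the exact set of raising
-- negatives is not closed-form, so all of them are excluded — on the non-raising negatives A returns
-- and B returns the very same value (see the cites).
def Pre_iter_stone (stone : Int) (times : Int) : Prop := 0 ≤ stone ∨ times ≤ 0
instance (stone : Int) (times : Int) : Decidable (Pre_iter_stone stone times) := by unfold Pre_iter_stone; infer_instance
def pvWitness_iter_stone : Int × Int := (17, 3)
def Spec_iter_stone (stone : Int) (times : Int) (out : Int) : Prop := out = iter_stone_alt stone times
instance (stone : Int) (times : Int) (out : Int) : Decidable (Spec_iter_stone stone times out) := by unfold Spec_iter_stone; infer_instance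

-- ===== CLAIM =====
def Claim_equal_iter_stone : Prop := ∀ (stone : Int) (times : Int), Dom_iter_stone stone times → Pre_iter_stone stone times → Spec_iter_stone stone times (iter_stone stone times)

-- ===== LEMMAS AND PROOFS =====

-- the two ports share the one-stone rule verbatim
theorem stone_children_eq (s : Int) : stone_children s = apply_rules s := rfl

-- number of descendants of one stone after n steps (the common specification)
def cnt (s : Int) : Nat → Int
  | 0 => 1
  | n + 1 => ((apply_rules s).map (fun c => cnt c n)).sum

-- one step of A: the list of all children
def stepA (l : List Int) : List Int := l.flatMap apply_rules

theorem sum_flatMap_int {α : Type} (l : List α) (f : α → List Int) :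
    (l.flatMap f).sum = (l.map (fun a => (f a).sum)).sum := by
  induction l with
  | nil => simp
  | cons x xs ih => simp [ih]

theorem lemA : ∀ (n : Nat) (l : List Int),
    (l.map (fun s => cnt s n)).sum = ((stepA^[n] l).length : Int) := by
  intro n
  induction n with
  | zero => intro l; simp [cnt]
  | succ n ih =>
    intro l
    have : (l.map (fun s => cnt s (n + 1))).sum = ((stepA l).map (fun c => cnt c n)).sum := by
      show _ = ((l.flatMap apply_rules).map (fun c => cnt c n)).sum
      rw [List.map_flatMap, sum_flatMap_int]
      simp [cnt]
    rw [this, ih (stepA l), Function.iterate_succ_apply]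

-- a loop that ignores its index is an iterate
theorem foldA (times : Int) (l : List Int) :
    (PySem.List.pyRange 0 times 1).foldl
      (fun start _ => start.foldl (fun new s => new ++ apply_rules s) []) l
      = stepA^[times.toNat] l := by
  have hf : (fun (start : List Int) (_ : Int) => start.foldl (fun new s => new ++ apply_rules s) [])
      = fun start _ => stepA start := by
    funext start _
    simpa using PySem.List.foldl_append_eq_flatMap (l := start) (g := apply_rules) (acc := [])
  rw [hf, List.foldl_const, PySem.List.length_pyRange_one]
  simp

theorem iter_stone_eq_cnt (stone times : Int) :
    iter_stone stone times = cnt stone times.toNat := by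
  unfold iter_stone
  rw [foldA]
  have := lemA times.toNat [stone]
  simp only [List.map_cons, List.map_nil, List.sum_cons, List.sum_nil, add_zero] at this
  simp [← this]

-- the memo invariant: every stored value is the true descendant count
def MemoInv (memo : PySem.Dict (Int × Nat) Int) : Prop :=
  ∀ k v, memo.get? k = some v → v = cnt k.1 k.2

-- countMemo returns the true count and preserves the invariant
theorem countMemo_correct : ∀ (n : Nat) (s : Int) (memo : PySem.Dict (Int × Nat) Int),
    MemoInv memo → (countMemo s n memo).1 = cnt s n ∧ MemoInv (countMemo s n memo).2 := by
  intro n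
  induction n with
  | zero => intro s memo h; exact ⟨rfl, h⟩
  | succ n ih =>
    intro s memo h
    show (match memo.get? (s, n + 1) with
      | some v => (v, memo)
      | none => _ : Int × _).1 = _ ∧ MemoInv (match memo.get? (s, n + 1) with
      | some v => (v, memo)
      | none => _ : Int × _).2
    cases hm : memo.get? (s, n + 1) with
    | some v => exact ⟨h (s, n + 1) v hm, h⟩
    | none =>
      -- the fold over the children: partial-sum invariant
      have hfold : ∀ (l : List Int) (acc : Int) (m : PySem.Dict (Int × Nat) Int), MemoInv m →
          (l.foldl (fun (p : Int × PySem.Dict (Int × Nat) Int) c =>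
              let q := countMemo c n p.2
              (p.1 + q.1, q.2)) (acc, m)).1 = acc + (l.map (fun c => cnt c n)).sum ∧
          MemoInv (l.foldl (fun (p : Int × PySem.Dict (Int × Nat) Int) c =>
              let q := countMemo c n p.2
              (p.1 + q.1, q.2)) (acc, m)).2 := by
        intro l
        induction l with
        | nil => intro acc m hm'; simpa using hm'
        | cons c cs ihl =>
          intro acc m hm'
          obtain ⟨h1, h2⟩ := ih c m hm'
          obtain ⟨h3, h4⟩ := ihl (acc + (countMemo c n m).1) (countMemo c n m).2 h2
          refine ⟨?_, h4⟩
          simp only [List.foldl_cons, List.map_cons, List.sum_cons] at *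
          rw [h3, h1]; ring
      obtain ⟨h1, h2⟩ := hfold (stone_children s) 0 memo h
      have hval : (((stone_children s).foldl (fun (p : Int × PySem.Dict (Int × Nat) Int) c =>
              let q := countMemo c n p.2
              (p.1 + q.1, q.2)) (0, memo))).1 = cnt s (n + 1) := by
        rw [h1, stone_children_eq]; simp [cnt]
      refine ⟨hval, ?_⟩
      intro k v hk
      rw [PySem.Dict.get?_insert] at hk
      by_cases hke : k = (s, n + 1)
      · subst hke
        simp at hk
        rw [← hk, hval]
      · rw [if_neg hke] at hk
        exact h2 k v hk

theorem iter_stone_alt_eq_cnt (stone times : Int) :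
    iter_stone_alt stone times = cnt stone times.toNat := by
  unfold iter_stone_alt
  exact (countMemo_correct times.toNat stone PySem.Dict.empty
    (by intro k v hk; simp [PySem.Dict.get?_empty] at hk)).1

-- ===== VERDICT =====
theorem iter_stone_spec : Claim_equal_iter_stone := by
  intro stone times _ _
  unfold Spec_iter_stone
  rw [iter_stone_eq_cnt, iter_stone_alt_eq_cnt]
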